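-- pv_equiv track=rewrite | github.com/0aax/jianpu | src/composition.py | gen_measured_notes
-- ===== SOURCE A (Python) =====
-- types_measures = {'bar', 'dbar', 'ebar', 'lrep', 'rrep'}
--
-- def gen_measured_notes(notes):
--     """
--     Re-organizes notes such that all notes in a bar are grouped in an array.
--     """
--     measured_notes = []
--     curr_bar = []
--     for n in notes:
--         if n[0] in types_measures:
--             measured_notes.append(curr_bar)
--             curr_bar = []
--         else: curr_bar.append(n)
--     if len(curr_bar) != 0: measured_notes.append(curr_bar)
--     return measured_notes
-- ===== SOURCE B (Python) =====
-- types_measures = {'bar', 'dbar', 'ebar', 'lrep', 'rrep'}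
--
-- def gen_measured_notes(notes):
--     """Two-pass: find barline indices, then cut the list into slices between them."""
--     bar_idxs = [i for i, n in enumerate(notes) if n[0] in types_measures]
--     bars = []
--     prev = 0
--     for i in bar_idxs:
--         bars.append(notes[prev:i])
--         prev = i + 1
--     tail = notes[prev:]
--     if tail:
--         bars.append(tail)
--     return bars
-- ===== Notes on version B (the rewrite author's own statement) =====
-- stated objective: alternative
-- what changed: Replaces A's single accumulator loop (growing the current bar note by note) with a two-pass slicing scheme: first collect the indices of barline markers, then emit the slice of notes between consecutive markers, appending the final slice only when non-empty.
import Mathlib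
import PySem

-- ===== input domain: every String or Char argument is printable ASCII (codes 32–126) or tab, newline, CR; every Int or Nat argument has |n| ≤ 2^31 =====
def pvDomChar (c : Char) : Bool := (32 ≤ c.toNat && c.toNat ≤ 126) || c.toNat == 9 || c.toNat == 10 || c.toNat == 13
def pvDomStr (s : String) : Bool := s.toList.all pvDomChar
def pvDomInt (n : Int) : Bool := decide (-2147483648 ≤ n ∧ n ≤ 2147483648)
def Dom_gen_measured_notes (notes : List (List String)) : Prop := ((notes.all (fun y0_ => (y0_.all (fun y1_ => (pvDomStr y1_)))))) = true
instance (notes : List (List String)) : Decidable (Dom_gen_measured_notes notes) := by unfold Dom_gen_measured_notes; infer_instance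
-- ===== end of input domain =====

-- B groups notes into bars by slicing between precomputed barline indices instead of
-- accumulating the current bar element by element; same O(n) cost, different decomposition.

-- ===== PORT A =====

-- n[0] in types_measures; the `none` branch is Python's IndexError on an empty note
-- (excluded by Pre_gen_measured_notes)
def pvIsBar (n : List String) : Bool :=
  match PySem.List.pyGet? n 0 with
  | some h => ["bar", "dbar", "ebar", "lrep", "rrep"].contains h
  | none => false

-- loop body of A: state = (measured_notes, curr_bar)
def pvStepA (st : List (List (List String)) × List (List String)) (n : List String) :
    List (List (List String)) × List (List String) :=
  if pvIsBar n then (st.1 ++ [st.2], []) else (st.1, st.2 ++ [n])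

def gen_measured_notes (notes : List (List String)) : List (List (List String)) :=
  let st := notes.foldl pvStepA ([], [])
  if st.2.length ≠ 0 then st.1 ++ [st.2] else st.1

-- ===== PORT B =====

-- loop body of B: state = (bars, prev); appends notes[prev:i], sets prev = i+1
def pvStepB (notes : List (List String)) (st : List (List (List String)) × Int) (i : Int) :
    List (List (List String)) × Int :=
  (st.1 ++ [PySem.List.slice notes (some st.2) (some i)], i + 1)

def gen_measured_notes_alt (notes : List (List String)) : List (List (List String)) :=
  let bar_idxs : List Int :=
    ((PySem.List.enumerate notes).filter (fun p => pvIsBar p.2)).map (·.1)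
  let st := bar_idxs.foldl (pvStepB notes) ([], 0)
  let tail := PySem.List.slice notes (some st.2) none
  if tail ≠ [] then st.1 ++ [tail] else st.1

-- ===== PRECONDITION & SPEC =====
-- Pre_ excludes inputs containing an empty note, on which A (and B) raise IndexError at n[0].
def Pre_gen_measured_notes (notes : List (List String)) : Prop := ∀ n ∈ notes, n ≠ []
instance (notes : List (List String)) : Decidable (Pre_gen_measured_notes notes) := by
  unfold Pre_gen_measured_notes; infer_instance

def pvWitness_gen_measured_notes : List (List String) :=
  [["1"], ["bar"], ["2"], ["3"], ["ebar"]]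

def Spec_gen_measured_notes (notes : List (List String)) (out : List (List (List String))) : Prop := out = gen_measured_notes_alt notes
instance (notes : List (List String)) (out : List (List (List String))) : Decidable (Spec_gen_measured_notes notes out) := by unfold Spec_gen_measured_notes; infer_instance

-- ===== CLAIM (what is proved, stated in full; the proofs are below) =====
def Claim_equal_gen_measured_notes : Prop := ∀ (notes : List (List String)), Dom_gen_measured_notes notes → Pre_gen_measured_notes notes → Spec_gen_measured_notes notes (gen_measured_notes notes)

-- ===== LEMMAS AND PROOFS =====

-- reference recursion both ports are reduced to: g ns c = bars of ns with pending bar c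
def pvG : List (List String) → List (List String) → List (List (List String))
  | [], c => if c.length ≠ 0 then [c] else []
  | n :: ns, c => if pvIsBar n then c :: pvG ns [] else pvG ns (c ++ [n])

-- ---- A side ----

theorem pvA_finish (ns : List (List String)) :
    ∀ c, (let st := ns.foldl pvStepA ([], c)
          if st.2.length ≠ 0 then st.1 ++ [st.2] else st.1) = pvG ns c := by
  induction ns with
  | nil => intro c; simp [pvG]
  | cons n ns ih =>
    intro c
    by_cases h : pvIsBar n = true
    · -- fold acc lemma inline: pull [c] out of the accumulator
      have acc : ∀ (is : List (List String)) (m : List (List (List String))) (cc : List (List String)),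
          is.foldl pvStepA (m, cc) = (m ++ (is.foldl pvStepA ([], cc)).1, (is.foldl pvStepA ([], cc)).2) := by
        intro is
        induction is with
        | nil => intro m cc; simp
        | cons x xs ihx =>
          intro m cc
          simp only [List.foldl_cons, pvStepA, List.nil_append]
          by_cases hx : pvIsBar x = true
          · simp only [hx, if_true]
            rw [ihx (m ++ [cc]) [], ihx [cc] []]
            simp
          · simp only [hx, if_false, Bool.false_eq_true]
            exact ihx m (cc ++ [x])
      simp only [List.foldl_cons, pvStepA, h, if_true, pvG, List.nil_append]
      rw [acc ns [c] []]
      have := ih []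
      simp only at this ⊢
      rw [← this]
      by_cases ht : (ns.foldl pvStepA ([], [])).2.length ≠ 0 <;> simp [ht]
    · simp only [List.foldl_cons, pvStepA, h, if_false, Bool.false_eq_true, pvG]
      exact ih (c ++ [n])

-- ---- B side ----

-- marker indices of ns when enumeration starts at s
def pvL (ns : List (List String)) (s : Nat) : List Int :=
  ((PySem.List.enumerate ns (s : Int)).filter (fun p => pvIsBar p.2)).map (·.1)

theorem pvL_cons (n : List String) (ns : List (List String)) (s : Nat) :
    pvL (n :: ns) s = (if pvIsBar n then [(s : Int)] else []) ++ pvL ns (s + 1) := by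
  by_cases h : pvIsBar n = true <;>
    simp [pvL, PySem.List.enumerate_cons, h]

-- accumulator lemma for B's fold
theorem pvB_acc (notes : List (List String)) (is : List Int) :
    ∀ (m : List (List (List String))) (p : Int),
      is.foldl (pvStepB notes) (m, p)
        = (m ++ (is.foldl (pvStepB notes) ([], p)).1, (is.foldl (pvStepB notes) ([], p)).2) := by
  induction is with
  | nil => intro m p; simp
  | cons i is ih =>
    intro m p
    simp only [List.foldl_cons, pvStepB, List.nil_append]
    rw [ih (m ++ _) (i + 1), ih [_] (i + 1)]
    simp

-- master lemma: B's slicing fold over pre ++ ns with prev = p computes pvG ns (pre.drop p)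
theorem pvB_master (ns : List (List String)) :
    ∀ (pre : List (List String)) (p : Nat), p ≤ pre.length →
      (let st := (pvL ns pre.length).foldl (pvStepB (pre ++ ns)) ([], (p : Int))
       let tail := PySem.List.slice (pre ++ ns) (some st.2) none
       if tail ≠ [] then st.1 ++ [tail] else st.1) = pvG ns (pre.drop p) := by
  induction ns with
  | nil =>
    intro pre p hp
    simp only [pvL, PySem.List.enumerate_nil, List.filter_nil, List.map_nil, List.foldl_nil,
      List.append_nil, PySem.List.slice_from_natCast, pvG]
    by_cases h : pre.drop p = []
    · simp [h]
    · have h0 : (pre.drop p).length ≠ 0 := fun hc => h (List.length_eq_zero_iff.mp hc)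
      simp only [List.length_drop] at h0
      simp [h, h0]
  | cons n ns ih =>
    intro pre p hp
    rw [pvL_cons]
    by_cases h : pvIsBar n = true
    · simp only [h, if_true, List.singleton_append, List.foldl_cons, pvStepB]
      have hslice : PySem.List.slice (pre ++ n :: ns) (some (p : Int)) (some (pre.length : Int))
          = pre.drop p := by
        rw [PySem.List.slice_natCast]
        rw [List.drop_append_of_le_length hp]
        have hlen : (pre.drop p).length = pre.length - p := by simp
        rw [List.take_append_of_le_length (by omega)]
        exact List.take_of_length_le (by omega)
      rw [hslice, pvB_acc]
      have hpre1 : (pre.length : Int) + 1 = (((pre ++ [n]).length : Nat) : Int) := by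
        push_cast [List.length_append, List.length_cons, List.length_nil]; ring
      have hL : pvL ns (pre.length + 1) = pvL ns (pre ++ [n]).length := by simp
      have := ih (pre ++ [n]) (pre ++ [n]).length (le_refl _)
      simp only [List.append_assoc, List.singleton_append, List.drop_length] at this
      simp only [pvG, h, if_true]
      rw [hpre1, hL]
      rw [← this]
      by_cases ht : PySem.List.slice (pre ++ n :: ns)
          (some ((pvL ns (pre ++ [n]).length).foldl (pvStepB (pre ++ n :: ns))
            ([], ((pre ++ [n]).length : Int))).2) none ≠ [] <;>
        simp_all
    · simp only [h, if_false, Bool.false_eq_true, List.nil_append]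
      have hpre1 : pvL ns (pre.length + 1) = pvL ns (pre ++ [n]).length := by simp
      have := ih (pre ++ [n]) p (by simp; omega)
      simp only [List.append_assoc, List.singleton_append] at this
      rw [hpre1, this]
      have hd : (pre ++ [n]).drop p = pre.drop p ++ [n] := List.drop_append_of_le_length hp
      rw [hd]
      simp [pvG, h]

theorem pvB_eq_G (notes : List (List String)) :
    gen_measured_notes_alt notes = pvG notes [] := by
  have := pvB_master notes [] 0 (by simp)
  simp only [List.nil_append, List.length_nil, List.drop_nil, Nat.cast_zero] at this
  rw [← this]
  rfl

-- ===== VERDICT (by name: the statement is the Claim_ definition above) =====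
theorem gen_measured_notes_spec : Claim_equal_gen_measured_notes := by
  intro notes _ _
  unfold Spec_gen_measured_notes
  rw [pvB_eq_G]
  exact (pvA_finish notes []).symm ▸ rfl
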